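-- pv_equiv track=rewrite | github.com/codr07/Project-Euler-Solusions | Solutions in Python/p225.py | has_tribonacci_multiple
-- ===== SOURCE A (Python) =====
-- def has_tribonacci_multiple(i):
-- 	seen = set()
-- 	a, b, c = 1, 1, 1
-- 	while True:
-- 		key = (a, b, c)
-- 		if key in seen:
-- 			return False
-- 		seen.add(key)
-- 		if a % i == 0:
-- 			return True
-- 		a, b, c = b, c, (a + b + c) % i
-- ===== SOURCE B (Python) =====
-- def has_tribonacci_multiple(i):
--     # The three leading states (1,1,1),(1,1,_),(1,_,_) have first component 1,
--     # so they contribute a hit exactly when 1 % i == 0.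
--     if 1 % i == 0:
--         return True
--     # Advance to s3, the first state whose components are all reduced mod i.
--     # From s3 on the step map is a bijection on reduced triples, so the
--     # sequence is purely periodic: walk one full period, no 'seen' set needed.
--     a, b, c = 1, 1, 1
--     for _ in range(3):
--         a, b, c = b, c, (a + b + c) % i
--     start = (a, b, c)
--     while True:
--         if a % i == 0:
--             return True
--         a, b, c = b, c, (a + b + c) % i
--         if (a, b, c) == start:
--             return False
-- ===== Notes on version B (the rewrite author's own statement) =====
-- stated objective: alternative
-- what changed: B drops the 'seen' set entirely: it handles the three non-reduced leading states by the closed-form test 1 % i == 0, then walks exactly one period of the (purely periodic, because the step map is a bijection on reduced triples) sequence starting from the first fully reduced state s3, stopping when the state returns to s3.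
-- outside the precondition, e.g. on has_tribonacci_multiple(0): A raises ZeroDivisionError, B raises ZeroDivisionError
import Mathlib
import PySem

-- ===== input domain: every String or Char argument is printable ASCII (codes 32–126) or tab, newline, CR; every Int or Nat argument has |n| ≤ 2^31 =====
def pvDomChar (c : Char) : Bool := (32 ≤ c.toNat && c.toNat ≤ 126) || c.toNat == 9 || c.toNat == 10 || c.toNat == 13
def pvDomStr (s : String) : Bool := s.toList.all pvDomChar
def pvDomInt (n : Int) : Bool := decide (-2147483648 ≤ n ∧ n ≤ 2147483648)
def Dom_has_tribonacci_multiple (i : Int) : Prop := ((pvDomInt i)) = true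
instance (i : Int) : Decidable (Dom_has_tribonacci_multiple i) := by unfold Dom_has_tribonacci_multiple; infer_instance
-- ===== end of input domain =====

-- B replaces A's unbounded 'seen'-set scan by a closed-form test for the three non-reduced
-- leading states plus a single full-period walk in O(1) memory (objective: alternative).

-- ===== PORT A =====
-- A's 'while True' loop. The fuel is a termination guard only: the loop revisits a state
-- (and returns) within (2|i|+1)^3 + 4 iterations, which the lemmas below prove.
def pvFuel (i : Int) : Nat := (2 * i.natAbs + 1) ^ 3 + 4

def hasTribLoopA (i : Int) : Nat → Std.HashSet (Int × Int × Int) → Int → Int → Int → Bool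
  | 0, _, _, _, _ => false
  | fuel + 1, seen, a, b, c =>
    if seen.contains (a, b, c) then false
    else if PySem.Int.mod a i == 0 then true
    else hasTribLoopA i fuel (seen.insert (a, b, c)) b c (PySem.Int.mod (a + b + c) i)

def has_tribonacci_multiple (i : Int) : Bool :=
  hasTribLoopA i (pvFuel i) ∅ 1 1 1

-- ===== PORT B =====
-- B's own termination guard (same bound: one full period fits inside it)
def pvFuelB (i : Int) : Nat := (2 * i.natAbs + 1) ^ 3 + 4

-- helper: one step of the tuple assignment a, b, c = b, c, (a + b + c) % i
def tribStepB (i : Int) (s : Int × Int × Int) : Int × Int × Int :=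
  (s.2.1, s.2.2, PySem.Int.mod (s.1 + s.2.1 + s.2.2) i)

def hasTribLoopB (i : Int) (start : Int × Int × Int) : Nat → Int → Int → Int → Bool
  | 0, _, _, _ => false
  | fuel + 1, a, b, c =>
    if PySem.Int.mod a i == 0 then true
    else
      let s' := tribStepB i (a, b, c)
      if s' == start then false
      else hasTribLoopB i start fuel s'.1 s'.2.1 s'.2.2

def has_tribonacci_multiple_alt (i : Int) : Bool :=
  if PySem.Int.mod 1 i == 0 then true
  else
    let start := tribStepB i (tribStepB i (tribStepB i (1, 1, 1)))
    hasTribLoopB i start (pvFuelB i) start.1 start.2.1 start.2.2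

-- ===== PRECONDITION & SPEC =====
-- Pre_ excludes only i = 0, where Python's 'a % i' raises ZeroDivisionError in both A and B.
def Pre_has_tribonacci_multiple (i : Int) : Prop := i ≠ 0
instance (i : Int) : Decidable (Pre_has_tribonacci_multiple i) := by unfold Pre_has_tribonacci_multiple; infer_instance
def pvWitness_has_tribonacci_multiple : Int := 5

def Spec_has_tribonacci_multiple (i : Int) (out : Bool) : Prop := out = has_tribonacci_multiple_alt i
instance (i : Int) (out : Bool) : Decidable (Spec_has_tribonacci_multiple i out) := by unfold Spec_has_tribonacci_multiple; infer_instance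

-- ===== CLAIM (what is proved, stated in full; the proofs are below) =====
def Claim_equal_has_tribonacci_multiple : Prop := ∀ (i : Int), Dom_has_tribonacci_multiple i → Pre_has_tribonacci_multiple i → Spec_has_tribonacci_multiple i (has_tribonacci_multiple i)

-- ===== LEMMAS AND PROOFS =====

theorem pymod_congr (i x y : Int) (hi : i ≠ 0) (h : i ∣ x - y) :
    PySem.Int.mod x i = PySem.Int.mod y i := by
  have hx := PySem.Int.floordiv_mul_add_mod x i
  have hy := PySem.Int.floordiv_mul_add_mod y i
  have hd : i ∣ (PySem.Int.mod x i - PySem.Int.mod y i) := by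
    obtain ⟨k, hk⟩ := h
    exact ⟨k - PySem.Int.floordiv x i + PySem.Int.floordiv y i, by linear_combination hx - hy + hk⟩
  have habs : |PySem.Int.mod x i - PySem.Int.mod y i| < |i| := by
    rcases lt_or_gt_of_ne hi with hneg | hpos
    · obtain ⟨h1, h2⟩ := PySem.Int.mod_neg_bounds x hneg
      obtain ⟨h3, h4⟩ := PySem.Int.mod_neg_bounds y hneg
      rw [abs_of_neg hneg, abs_lt]; omega
    · have h1 := PySem.Int.mod_nonneg x hpos
      have h2 := PySem.Int.mod_lt x hpos
      have h3 := PySem.Int.mod_nonneg y hpos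
      have h4 := PySem.Int.mod_lt y hpos
      rw [abs_of_pos hpos, abs_lt]; omega
  have h0 := Int.eq_zero_of_abs_lt_dvd ((abs_dvd i _).mpr hd) habs
  omega

theorem pymod_pymod (i x : Int) (hi : i ≠ 0) :
    PySem.Int.mod (PySem.Int.mod x i) i = PySem.Int.mod x i := by
  have hx := PySem.Int.floordiv_mul_add_mod x i
  exact pymod_congr i (PySem.Int.mod x i) x hi ⟨-(PySem.Int.floordiv x i), by linear_combination hx⟩

theorem pymod_abs_le (i x : Int) (hi : i ≠ 0) : |PySem.Int.mod x i| ≤ |i| := by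
  rcases lt_or_gt_of_ne hi with hneg | hpos
  · obtain ⟨h1, h2⟩ := PySem.Int.mod_neg_bounds x hneg
    rw [abs_of_neg hneg, abs_le]; omega
  · have h1 := PySem.Int.mod_nonneg x hpos
    have h2 := PySem.Int.mod_lt x hpos
    rw [abs_of_pos hpos, abs_le]; omega

def tribO (i : Int) (n : Nat) : Int × Int × Int := (tribStepB i)^[n] (1, 1, 1)

def tribZ (i : Int) (s : Int × Int × Int) : Prop := PySem.Int.mod s.1 i = 0

def tribBox (i : Int) (s : Int × Int × Int) : Prop :=
  |s.1| ≤ |i| ∧ |s.2.1| ≤ |i| ∧ |s.2.2| ≤ |i|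

theorem tribO_box (i : Int) (hi : i ≠ 0) (n : Nat) : tribBox i (tribO i n) := by
  induction n with
  | zero =>
    have h1 : (1 : Int) ≤ |i| := Int.one_le_abs (by omega)
    exact ⟨by simpa [tribO] using h1, by simpa [tribO] using h1, by simpa [tribO] using h1⟩
  | succ n ih =>
    have hstep : tribO i (n + 1) = tribStepB i (tribO i n) := Function.iterate_succ_apply' _ _ _
    obtain ⟨h1, h2, h3⟩ := ih
    refine ⟨?_, ?_, ?_⟩ <;> rw [hstep] <;> simp only [tribStepB]
    · exact h2
    · exact h3
    · exact pymod_abs_le i _ hi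

def tribN (i : Int) : Nat := (2 * i.natAbs + 1) ^ 3

noncomputable def tribT (i : Int) : Finset (Int × Int × Int) :=
  (Finset.Icc (-(i.natAbs : Int)) (i.natAbs)) ×ˢ
    ((Finset.Icc (-(i.natAbs : Int)) (i.natAbs)) ×ˢ (Finset.Icc (-(i.natAbs : Int)) (i.natAbs)))

theorem tribT_card (i : Int) : (tribT i).card = tribN i := by
  have hc : (Finset.Icc (-(i.natAbs : Int)) (i.natAbs)).card = 2 * i.natAbs + 1 := by
    rw [Int.card_Icc]; omega
  rw [tribT, Finset.card_product, Finset.card_product, hc, tribN]; ring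

theorem mem_tribT (i : Int) (s : Int × Int × Int) (h : tribBox i s) : s ∈ tribT i := by
  obtain ⟨h1, h2, h3⟩ := h
  have habs : |i| = (i.natAbs : Int) := (Int.abs_eq_natAbs i)
  rw [habs] at h1 h2 h3
  rw [abs_le] at h1 h2 h3
  simp only [tribT, Finset.mem_product, Finset.mem_Icc]
  exact ⟨⟨h1.1, h1.2⟩, ⟨h2.1, h2.2⟩, ⟨h3.1, h3.2⟩⟩

def tribRQ (i : Int) (n : Nat) : Prop := ∃ j < n, tribO i n = tribO i j

theorem trib_exists_repeat (i : Int) (hi : i ≠ 0) : ∃ n ≤ tribN i, tribRQ i n := by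
  have hmaps : ∀ n ∈ Finset.range (tribN i + 1), tribO i n ∈ tribT i :=
    fun n _ => mem_tribT i _ (tribO_box i hi n)
  have hcard : (tribT i).card < (Finset.range (tribN i + 1)).card := by
    rw [Finset.card_range, tribT_card]; omega
  obtain ⟨j, hj, k, hk, hne, heq⟩ :=
    Finset.exists_ne_map_eq_of_card_lt_of_maps_to hcard hmaps
  rcases Nat.lt_or_ge j k with hlt | hge
  · exact ⟨k, by simpa using Nat.lt_succ_iff.mp (Finset.mem_range.mp hk), ⟨j, hlt, heq.symm⟩⟩
  · have hlt : k < j := lt_of_le_of_ne hge (fun h => hne h.symm)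
    exact ⟨j, by simpa using Nat.lt_succ_iff.mp (Finset.mem_range.mp hj), ⟨k, hlt, heq⟩⟩

@[reducible] def tribRQdec (i : Int) : DecidablePred (tribRQ i) := fun n => by
  unfold tribRQ; infer_instance

def tribR (i : Int) (h : ∃ n, tribRQ i n) : Nat := @Nat.find _ (tribRQdec i) h

theorem tribR_spec (i : Int) (h : ∃ n, tribRQ i n) : tribRQ i (tribR i h) :=
  @Nat.find_spec _ (tribRQdec i) h

theorem tribR_min (i : Int) (h : ∃ n, tribRQ i n) {m : Nat} (hm : m < tribR i h) :
    ¬ tribRQ i m := @Nat.find_min _ (tribRQdec i) h m hm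

theorem trib_prefix_inj (i : Int) (h : ∃ n, tribRQ i n) {j k : Nat}
    (hjk : j < k) (hk : k < tribR i h) : tribO i j ≠ tribO i k := by
  intro he
  exact tribR_min i h hk ⟨j, hjk, he.symm⟩

theorem trib_cover (i : Int) (h : ∃ n, tribRQ i n) (n : Nat) :
    ∃ k < tribR i h, tribO i k = tribO i n := by
  induction n using Nat.strong_induction_on with
  | _ n ih =>
    by_cases hn : n < tribR i h
    · exact ⟨n, hn, rfl⟩
    · push_neg at hn
      obtain ⟨j0, hj0, heq⟩ := tribR_spec i h
      have h1 : tribO i n = tribO i ((n - tribR i h) + j0) := by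
        have e1 : n = (n - tribR i h) + tribR i h := by omega
        calc tribO i n = (tribStepB i)^[(n - tribR i h) + tribR i h] (1,1,1) := by
              rw [show tribO i n = (tribStepB i)^[n] (1,1,1) from rfl, ← e1]
          _ = (tribStepB i)^[n - tribR i h] (tribO i (tribR i h)) :=
              Function.iterate_add_apply _ _ _ _
          _ = (tribStepB i)^[n - tribR i h] (tribO i j0) := by rw [heq]
          _ = (tribStepB i)^[(n - tribR i h) + j0] (1,1,1) :=
              (Function.iterate_add_apply _ _ _ _).symm
          _ = tribO i ((n - tribR i h) + j0) := rfl
      by_cases hz : n = tribR i h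
      · exact ⟨j0, hj0, by rw [h1]; congr 1; omega⟩
      · have hlt : (n - tribR i h) + j0 < n := by omega
        obtain ⟨k, hk, he⟩ := ih _ hlt
        exact ⟨k, hk, by rw [he, h1]⟩

theorem loopA_true (i : Int) (h : ∃ n, tribRQ i n) (m : Nat)
    (hZ : tribZ i (tribO i m)) (hmR : m < tribR i h) :
    ∀ fuel n (seen : Std.HashSet (Int × Int × Int)), n ≤ m →
      (∀ k, k < m → ¬ tribZ i (tribO i k)) →
      (∀ s, s ∈ seen ↔ ∃ k < n, tribO i k = s) → m - n < fuel →
      hasTribLoopA i fuel seen (tribO i n).1 (tribO i n).2.1 (tribO i n).2.2 = true := by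
  intro fuel
  induction fuel with
  | zero => intro n seen _ _ _ hf; omega
  | succ fuel ihf =>
    intro n seen hnm hmin hinv hf
    have heta : ((tribO i n).1, (tribO i n).2.1, (tribO i n).2.2) = tribO i n := rfl
    have hc : ¬ (seen.contains ((tribO i n).1, (tribO i n).2.1, (tribO i n).2.2) = true) := by
      rw [heta, ← Std.HashSet.mem_iff_contains, hinv]
      rintro ⟨k, hk, he⟩
      exact trib_prefix_inj i h hk (lt_of_le_of_lt hnm hmR) he
    rcases Nat.lt_or_ge n m with hlt | hge
    · have hz : ¬ ((PySem.Int.mod (tribO i n).1 i == 0) = true) := by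
        rw [beq_iff_eq]; exact hmin n hlt
      simp only [hasTribLoopA, heta]
      rw [if_neg hc, if_neg hz]
      have hstep : tribO i (n + 1) = tribStepB i (tribO i n) := Function.iterate_succ_apply' _ _ _
      have hinv' : ∀ s, s ∈ seen.insert (tribO i n) ↔ ∃ k < n + 1, tribO i k = s := by
        intro s
        rw [Std.HashSet.mem_insert, beq_iff_eq, hinv]
        constructor
        · rintro (he | ⟨k, hk, he⟩)
          · exact ⟨n, by omega, he⟩
          · exact ⟨k, by omega, he⟩
        · rintro ⟨k, hk, he⟩
          rcases Nat.lt_or_ge k n with h1 | h1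
          · exact Or.inr ⟨k, h1, he⟩
          · exact Or.inl (by rw [← he]; congr 1; omega)
      have := ihf (n + 1) (seen.insert (tribO i n)) (by omega) hmin hinv' (by omega)
      rw [hstep] at this
      simpa [tribStepB] using this
    · have hnm' : n = m := by omega
      subst hnm'
      have hz : (PySem.Int.mod (tribO i n).1 i == 0) = true := by rw [beq_iff_eq]; exact hZ
      simp only [hasTribLoopA, heta]
      rw [if_neg hc, if_pos hz]

theorem loopA_false (i : Int) (h : ∃ n, tribRQ i n)
    (hnoZ : ∀ k, ¬ tribZ i (tribO i k)) :
    ∀ fuel n (seen : Std.HashSet (Int × Int × Int)), n ≤ tribR i h →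
      (∀ s, s ∈ seen ↔ ∃ k < n, tribO i k = s) → tribR i h - n < fuel →
      hasTribLoopA i fuel seen (tribO i n).1 (tribO i n).2.1 (tribO i n).2.2 = false := by
  intro fuel
  induction fuel with
  | zero => intro n seen _ _ hf; omega
  | succ fuel ihf =>
    intro n seen hnR hinv hf
    have heta : ((tribO i n).1, (tribO i n).2.1, (tribO i n).2.2) = tribO i n := rfl
    rcases Nat.lt_or_ge n (tribR i h) with hlt | hge
    · have hc : ¬ (seen.contains ((tribO i n).1, (tribO i n).2.1, (tribO i n).2.2) = true) := by
        rw [heta, ← Std.HashSet.mem_iff_contains, hinv]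
        rintro ⟨k, hk, he⟩
        exact trib_prefix_inj i h hk hlt he
      have hz : ¬ ((PySem.Int.mod (tribO i n).1 i == 0) = true) := by
        rw [beq_iff_eq]; exact hnoZ n
      simp only [hasTribLoopA, heta]
      rw [if_neg hc, if_neg hz]
      have hstep : tribO i (n + 1) = tribStepB i (tribO i n) := Function.iterate_succ_apply' _ _ _
      have hinv' : ∀ s, s ∈ seen.insert (tribO i n) ↔ ∃ k < n + 1, tribO i k = s := by
        intro s
        rw [Std.HashSet.mem_insert, beq_iff_eq, hinv]
        constructor
        · rintro (he | ⟨k, hk, he⟩)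
          · exact ⟨n, by omega, he⟩
          · exact ⟨k, by omega, he⟩
        · rintro ⟨k, hk, he⟩
          rcases Nat.lt_or_ge k n with h1 | h1
          · exact Or.inr ⟨k, h1, he⟩
          · exact Or.inl (by rw [← he]; congr 1; omega)
      have := ihf (n + 1) (seen.insert (tribO i n)) (by omega) hinv' (by omega)
      rw [hstep] at this
      simpa [tribStepB] using this
    · obtain ⟨j0, hj0, heq⟩ := tribR_spec i h
      have hnR'' : tribR i h = n := by omega
      rw [hnR''] at heq hj0
      have hc : seen.contains ((tribO i n).1, (tribO i n).2.1, (tribO i n).2.2) = true := by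
        rw [heta, ← Std.HashSet.mem_iff_contains, hinv]
        exact ⟨j0, hj0, heq.symm⟩
      simp only [hasTribLoopA, heta]
      rw [if_pos hc]

@[reducible] def tribZdec (i : Int) : DecidablePred (fun n => tribZ i (tribO i n)) := fun n => by
  unfold tribZ; infer_instance

theorem A_char (i : Int) (hi : i ≠ 0) :
    (has_tribonacci_multiple i = true ↔ ∃ n, tribZ i (tribO i n)) := by
  obtain ⟨nR, hnR, hRQ⟩ := trib_exists_repeat i hi
  have hE : ∃ n, tribRQ i n := ⟨nR, hRQ⟩
  have hRle : tribR i hE ≤ tribN i := le_trans (@Nat.find_min' _ (tribRQdec i) hE nR hRQ) hnR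
  have hempty : ∀ s : Int × Int × Int, s ∈ (∅ : Std.HashSet (Int × Int × Int)) ↔
      ∃ k < 0, tribO i k = s := by
    intro s; constructor
    · intro hs; exact absurd hs (Std.HashSet.not_mem_empty)
    · rintro ⟨k, hk, _⟩; omega
  by_cases hz : ∃ n, tribZ i (tribO i n)
  · have hm := @Nat.find_spec _ (tribZdec i) hz
    set m := @Nat.find _ (tribZdec i) hz with hmdef
    have hmin : ∀ k < m, ¬ tribZ i (tribO i k) := fun k hk => @Nat.find_min _ (tribZdec i) hz k hk
    have hmR : m < tribR i hE := by
      obtain ⟨k, hk, he⟩ := trib_cover i hE m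
      have : m ≤ k := @Nat.find_min' _ (tribZdec i) hz k (by rw [tribZ, he, ← tribZ]; exact hm)
      omega
    have := loopA_true i hE m hm hmR (pvFuel i) 0 ∅ (by omega) hmin hempty
      (by unfold pvFuel; unfold tribN at hRle; omega)
    rw [has_tribonacci_multiple]
    exact ⟨fun _ => hz, fun _ => this⟩
  · have := loopA_false i hE (by push_neg at hz; exact fun k => hz k) (pvFuel i) 0
      ∅ (by omega) hempty (by unfold pvFuel; unfold tribN at hRle; omega)
    rw [has_tribonacci_multiple]
    constructor
    · intro ht
      have this' : hasTribLoopA i (pvFuel i) ∅ 1 1 1 = false := this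
      exact absurd (this'.symm.trans ht) (by simp)
    · intro hzz; exact absurd hzz hz

def tribO' (i : Int) (k : Nat) : Int × Int × Int := (tribStepB i)^[k] (tribO i 3)

theorem tribO'_eq (i : Int) (k : Nat) : tribO' i k = tribO i (3 + k) := by
  rw [tribO', tribO, tribO, Nat.add_comm, Function.iterate_add_apply]

def tribRed (i : Int) (s : Int × Int × Int) : Prop :=
  PySem.Int.mod s.1 i = s.1 ∧ PySem.Int.mod s.2.1 i = s.2.1 ∧ PySem.Int.mod s.2.2 i = s.2.2

theorem tribRed_step (i : Int) (hi : i ≠ 0) (s : Int × Int × Int) (h : tribRed i s) :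
    tribRed i (tribStepB i s) := by
  obtain ⟨h1, h2, h3⟩ := h
  exact ⟨h2, h3, pymod_pymod i _ hi⟩

theorem tribRed_O3 (i : Int) (hi : i ≠ 0) : tribRed i (tribO i 3) := by
  refine ⟨?_, ?_, ?_⟩ <;> exact pymod_pymod i _ hi

theorem tribO'_red (i : Int) (hi : i ≠ 0) (k : Nat) : tribRed i (tribO' i k) := by
  induction k with
  | zero => exact tribRed_O3 i hi
  | succ k ih =>
    have : tribO' i (k + 1) = tribStepB i (tribO' i k) := Function.iterate_succ_apply' _ _ _
    rw [this]; exact tribRed_step i hi _ ih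

def tribInv (i : Int) (s : Int × Int × Int) : Int × Int × Int :=
  (PySem.Int.mod (s.2.2 - s.1 - s.2.1) i, s.1, s.2.1)

theorem tribInv_step (i : Int) (hi : i ≠ 0) (s : Int × Int × Int)
    (hred : PySem.Int.mod s.1 i = s.1) : tribInv i (tribStepB i s) = s := by
  obtain ⟨a, b, c⟩ := s
  simp only [tribStepB, tribInv]
  have h1 : PySem.Int.mod (PySem.Int.mod (a + b + c) i - b - c) i = PySem.Int.mod a i := by
    apply pymod_congr i _ _ hi
    have hx := PySem.Int.floordiv_mul_add_mod (a + b + c) i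
    exact ⟨-(PySem.Int.floordiv (a + b + c) i), by linear_combination hx⟩
  simp only [h1, hred]

theorem trib_peel (i : Int) (hi : i ≠ 0) :
    ∀ j k, j ≤ k → tribO' i j = tribO' i k → tribO i 3 = tribO' i (k - j) := by
  intro j
  induction j with
  | zero =>
    intro k _ he
    simp only [Nat.sub_zero]
    rw [← he]
    rfl
  | succ j ih =>
    intro k hjk he
    obtain ⟨k', rfl⟩ : ∃ k', k = k' + 1 := ⟨k - 1, by omega⟩
    have hsj : tribO' i (j + 1) = tribStepB i (tribO' i j) := Function.iterate_succ_apply' _ _ _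
    have hsk : tribO' i (k' + 1) = tribStepB i (tribO' i k') := Function.iterate_succ_apply' _ _ _
    have h2 : tribO' i j = tribO' i k' := by
      have := congrArg (tribInv i) he
      rw [hsj, hsk, tribInv_step i hi _ (tribO'_red i hi j).1,
        tribInv_step i hi _ (tribO'_red i hi k').1] at this
      exact this
    have := ih k' (by omega) h2
    simpa using this

theorem trib_exists_period (i : Int) (hi : i ≠ 0) :
    ∃ q, q + 1 ≤ tribN i ∧ tribO' i (q + 1) = tribO i 3 := by
  have hmaps : ∀ n ∈ Finset.range (tribN i + 1), tribO' i n ∈ tribT i := by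
    intro n _
    rw [tribO'_eq]
    exact mem_tribT i _ (tribO_box i hi _)
  have hcard : (tribT i).card < (Finset.range (tribN i + 1)).card := by
    rw [Finset.card_range, tribT_card]; omega
  obtain ⟨j, hj, k, hk, hne, heq⟩ :=
    Finset.exists_ne_map_eq_of_card_lt_of_maps_to hcard hmaps
  rw [Finset.mem_range] at hj hk
  rcases Nat.lt_or_ge j k with hlt | hge
  · have := trib_peel i hi j k (by omega) heq
    exact ⟨k - j - 1, by omega, by rw [show k - j - 1 + 1 = k - j by omega]; exact this.symm⟩
  · have hlt : k < j := by omega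
    have := trib_peel i hi k j (by omega) heq.symm
    exact ⟨j - k - 1, by omega, by rw [show j - k - 1 + 1 = j - k by omega]; exact this.symm⟩

@[reducible] def tribPQdec (i : Int) : DecidablePred (fun q => tribO' i (q + 1) = tribO i 3) :=
  fun q => by infer_instance

def tribP (i : Int) (h : ∃ q, tribO' i (q + 1) = tribO i 3) : Nat :=
  @Nat.find _ (tribPQdec i) h + 1

theorem tribP_spec (i : Int) (h : ∃ q, tribO' i (q + 1) = tribO i 3) :
    tribO' i (tribP i h) = tribO i 3 := @Nat.find_spec _ (tribPQdec i) h

theorem tribP_min (i : Int) (h : ∃ q, tribO' i (q + 1) = tribO i 3) {q : Nat}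
    (h0 : 0 < q) (hq : q < tribP i h) : tribO' i q ≠ tribO i 3 := by
  obtain ⟨q', rfl⟩ : ∃ q', q = q' + 1 := ⟨q - 1, by omega⟩
  exact @Nat.find_min _ (tribPQdec i) h q' (by unfold tribP at hq; omega)

theorem tribO'_period (i : Int) (h : ∃ q, tribO' i (q + 1) = tribO i 3) (k : Nat) :
    tribO' i (k + tribP i h) = tribO' i k := by
  rw [tribO', Function.iterate_add_apply]
  rw [show (tribStepB i)^[tribP i h] (tribO i 3) = tribO' i (tribP i h) from rfl, tribP_spec]
  rfl

theorem tribO'_mod (i : Int) (h : ∃ q, tribO' i (q + 1) = tribO i 3) (k : Nat) :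
    tribO' i k = tribO' i (k % tribP i h) := by
  have haux : ∀ q r, tribO' i (q * tribP i h + r) = tribO' i r := by
    intro q
    induction q with
    | zero => intro r; simp
    | succ q ih =>
      intro r
      have : (q + 1) * tribP i h + r = (q * tribP i h + r) + tribP i h := by ring
      rw [this, tribO'_period i h, ih]
  have e : k / tribP i h * tribP i h + k % tribP i h = k := by
    rw [Nat.mul_comm]; exact Nat.div_add_mod k (tribP i h)
  conv_lhs => rw [← e]
  exact haux _ _

theorem loopB_run (i : Int) (h : ∃ q, tribO' i (q + 1) = tribO i 3) :
    ∀ fuel k, k < tribP i h → tribP i h - k ≤ fuel →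
      (hasTribLoopB i (tribO i 3) fuel (tribO' i k).1 (tribO' i k).2.1 (tribO' i k).2.2 = true ↔
        ∃ j < tribP i h, k ≤ j ∧ tribZ i (tribO' i j)) := by
  intro fuel
  induction fuel with
  | zero => intro k hk hf; exact absurd hf (by omega)
  | succ fuel ihf =>
    intro k hk hf
    have heta : ((tribO' i k).1, (tribO' i k).2.1, (tribO' i k).2.2) = tribO' i k := rfl
    have hsk : tribStepB i (tribO' i k) = tribO' i (k + 1) :=
      (Function.iterate_succ_apply' _ _ _).symm
    by_cases hz : PySem.Int.mod (tribO' i k).1 i = 0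
    · simp only [hasTribLoopB]
      rw [if_pos (by rw [beq_iff_eq]; exact hz)]
      exact ⟨fun _ => ⟨k, hk, le_refl _, hz⟩, fun _ => rfl⟩
    · simp only [hasTribLoopB, heta]
      rw [if_neg (by rw [beq_iff_eq]; exact hz), hsk]
      rcases Nat.lt_or_ge (k + 1) (tribP i h) with hlt | hge
      · have hne : ¬ ((tribO' i (k + 1) == tribO i 3) = true) := by
          rw [beq_iff_eq]; exact tribP_min i h (by omega) hlt
        rw [if_neg hne]
        rw [ihf (k + 1) hlt (by omega)]
        constructor
        · rintro ⟨j, hj, hkj, hzj⟩; exact ⟨j, hj, by omega, hzj⟩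
        · rintro ⟨j, hj, hkj, hzj⟩
          refine ⟨j, hj, ?_, hzj⟩
          rcases Nat.eq_or_lt_of_le hkj with rfl | hlt2
          · exact absurd hzj hz
          · omega
      · have hkp : k + 1 = tribP i h := by omega
        have heq : (tribO' i (k + 1) == tribO i 3) = true := by
          rw [beq_iff_eq, hkp]; exact tribP_spec i h
        rw [if_pos heq]
        constructor
        · intro hfalse; exact absurd hfalse (by simp)
        · rintro ⟨j, hj, hkj, hzj⟩
          have : j = k := by omega
          subst this
          exact absurd hzj hz

theorem B_char (i : Int) (hi : i ≠ 0) (h1 : ¬ PySem.Int.mod 1 i = 0) :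
    (has_tribonacci_multiple_alt i = true ↔ ∃ k, tribZ i (tribO' i k)) := by
  obtain ⟨q0, hq0le, hq0⟩ := trib_exists_period i hi
  have h : ∃ q, tribO' i (q + 1) = tribO i 3 := ⟨q0, hq0⟩
  have hPle : tribP i h ≤ tribN i :=
    le_trans (by have := @Nat.find_min' _ (tribPQdec i) h q0 hq0; unfold tribP; omega) hq0le
  have hstart : tribStepB i (tribStepB i (tribStepB i (1, 1, 1))) = tribO i 3 := rfl
  rw [has_tribonacci_multiple_alt]
  rw [if_neg (by rw [beq_iff_eq]; exact h1)]
  simp only [hstart]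
  have h0 : tribO i 3 = tribO' i 0 := rfl
  have hrun := loopB_run i h (pvFuelB i) 0 (by unfold tribP; omega)
    (by unfold pvFuelB; unfold tribN at hPle; omega)
  rw [show (tribO' i 0) = tribO i 3 from rfl] at hrun
  rw [hrun]
  constructor
  · rintro ⟨j, _, _, hzj⟩; exact ⟨j, hzj⟩
  · rintro ⟨k, hzk⟩
    refine ⟨k % tribP i h, Nat.mod_lt _ (by unfold tribP; omega), by omega, ?_⟩
    rw [← tribO'_mod i h]; exact hzk

theorem orbit_split (i : Int) (h1 : ¬ PySem.Int.mod 1 i = 0) :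
    ((∃ n, tribZ i (tribO i n)) ↔ ∃ k, tribZ i (tribO' i k)) := by
  constructor
  · rintro ⟨n, hn⟩
    match n, hn with
    | 0, hn => exact absurd hn h1
    | 1, hn => exact absurd hn h1
    | 2, hn => exact absurd hn h1
    | (k + 3), hn =>
      refine ⟨k, ?_⟩
      rw [tribO'_eq, Nat.add_comm]
      exact hn
  · rintro ⟨k, hk⟩
    refine ⟨3 + k, ?_⟩
    rw [← tribO'_eq]
    exact hk

-- ===== VERDICT (by name: the statement is the Claim_ definition above) =====
theorem has_tribonacci_multiple_spec : Claim_equal_has_tribonacci_multiple := by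
  intro i _ hpre
  unfold Pre_has_tribonacci_multiple at hpre
  unfold Spec_has_tribonacci_multiple
  by_cases h1 : PySem.Int.mod 1 i = 0
  · have hB : has_tribonacci_multiple_alt i = true := by
      rw [has_tribonacci_multiple_alt, if_pos (by rw [beq_iff_eq]; exact h1)]
    have hA : has_tribonacci_multiple i = true := by
      rw [has_tribonacci_multiple]
      obtain ⟨f, hf⟩ : ∃ f, pvFuel i = f + 1 := ⟨(2 * i.natAbs + 1) ^ 3 + 3, by unfold pvFuel; omega⟩
      rw [hf]
      simp only [hasTribLoopA]
      have hc : ¬ ((∅ : Std.HashSet (Int × Int × Int)).contains (1, 1, 1) = true) := by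
        rw [← Std.HashSet.mem_iff_contains]
        exact Std.HashSet.not_mem_empty
      rw [if_neg hc, if_pos (by rw [beq_iff_eq]; exact h1)]
    rw [hA, hB]
  · have hA := A_char i hpre
    have hB := B_char i hpre h1
    have hs := orbit_split i h1
    have hiff : has_tribonacci_multiple i = true ↔ has_tribonacci_multiple_alt i = true := by
      rw [hA, hB]; exact hs
    cases hx : has_tribonacci_multiple i <;> cases hy : has_tribonacci_multiple_alt i <;>
      simp_all
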